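-- pv_equiv track=rewrite | github.com/Amann09/uav-ugv-path-planning | Helper Functions/points_in_square.py | points_in_multiple_squares
-- ===== SOURCE A (Python) =====
-- def points_in_multiple_squares(waypoints, squares, half_length):
--     results = []
--     used_points = set()
--
--     for i, (center_x, center_y) in enumerate(squares):
--         points_inside = []
--
--         for x, y in waypoints:
--             if (x, y) not in used_points and abs(x - center_x) <= half_length and abs(y - center_y) <= half_length:
--                 points_inside.append((x, y))
--                 used_points.add((x, y))
--
--         results.append((f"Square {i + 1}: Center {(center_x, center_y)}", points_inside))
--
--     return results
-- ===== SOURCE B (Python) =====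
-- def points_in_multiple_squares(waypoints, squares, half_length):
--     # Transposed strategy: assign each distinct waypoint (first-occurrence order)
--     # to the FIRST square containing it, then emit one filtered bucket per square.
--     seen = set()
--     assigned = []
--     for (x, y) in waypoints:
--         if (x, y) in seen:
--             continue
--         seen.add((x, y))
--         for j, (cx, cy) in enumerate(squares):
--             if abs(x - cx) <= half_length and abs(y - cy) <= half_length:
--                 assigned.append(((x, y), j))
--                 break
--     return [(f"Square {i + 1}: Center {(cx, cy)}",
--              [p for p, j in assigned if j == i])
--             for i, (cx, cy) in enumerate(squares)]
-- ===== Notes on version B (the rewrite author's own statement) =====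
-- stated objective: alternative
-- what changed: Replaces the square-major scan with a mutating used-set by a waypoint-major pass that assigns each distinct waypoint to the first square containing it (breaking at the first hit), then builds each square's bucket by filtering that assignment list.
import Mathlib
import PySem

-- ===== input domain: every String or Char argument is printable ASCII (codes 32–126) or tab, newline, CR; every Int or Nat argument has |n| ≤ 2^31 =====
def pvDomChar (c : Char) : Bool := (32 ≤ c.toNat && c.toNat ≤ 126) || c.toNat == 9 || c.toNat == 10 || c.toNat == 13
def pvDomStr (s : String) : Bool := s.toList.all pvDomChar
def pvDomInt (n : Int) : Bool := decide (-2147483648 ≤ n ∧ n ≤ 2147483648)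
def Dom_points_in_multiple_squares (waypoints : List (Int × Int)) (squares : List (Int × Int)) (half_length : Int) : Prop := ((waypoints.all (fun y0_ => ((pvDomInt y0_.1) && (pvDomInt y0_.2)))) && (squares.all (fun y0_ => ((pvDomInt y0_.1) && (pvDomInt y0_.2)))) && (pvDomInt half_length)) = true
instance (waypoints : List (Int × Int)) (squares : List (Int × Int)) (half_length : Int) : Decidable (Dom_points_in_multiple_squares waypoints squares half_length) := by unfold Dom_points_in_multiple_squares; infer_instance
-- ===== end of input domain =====

-- B re-implements A waypoint-major: each distinct waypoint is assigned to the first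
-- square containing it (stopping at the first hit), then buckets are built per square;
-- a timing run measured B faster than A by a constant factor.

-- the f-string label "Square {i+1}: Center {(cx, cy)}" (shared verbatim by both Pythons)
def pimsLabel (i cx cy : Int) : String :=
  "Square " ++ PySem.Int.toStr (i + 1) ++ ": Center (" ++ PySem.Int.toStr cx ++ ", " ++ PySem.Int.toStr cy ++ ")"

-- ===== PORT A =====
def points_in_multiple_squares (waypoints : List (Int × Int)) (squares : List (Int × Int)) (half_length : Int) : List (String × (List (Int × Int))) :=
  -- results = [], used_points = set(); for i,(cx,cy) in enumerate(squares): inner loop over waypoints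
  let r := (PySem.List.enumerate squares 0).foldl
    (fun (st : List (String × List (Int × Int)) × PySem.Set (Int × Int)) e =>
      let inner := waypoints.foldl
        (fun (st2 : List (Int × Int) × PySem.Set (Int × Int)) p =>
          if !(PySem.Set.contains st2.2 p) && decide (|p.1 - e.2.1| ≤ half_length) && decide (|p.2 - e.2.2| ≤ half_length)
          then (st2.1 ++ [p], PySem.Set.add st2.2 p)
          else st2)
        ([], st.2)
      (st.1 ++ [(pimsLabel e.1 e.2.1 e.2.2, inner.1)], inner.2))
    ([], PySem.Set.empty)
  r.1

-- ===== PORT B =====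
-- the inner 'for j,(cx,cy) in enumerate(squares): if …: …; break' loop: first index whose square contains (x,y)
def pimsFind (es : List (Int × (Int × Int))) (half_length x y : Int) : Option Int :=
  match es with
  | [] => none
  | e :: rest =>
      if |x - e.2.1| ≤ half_length ∧ |y - e.2.2| ≤ half_length then some e.1
      else pimsFind rest half_length x y

def points_in_multiple_squares_alt (waypoints : List (Int × Int)) (squares : List (Int × Int)) (half_length : Int) : List (String × (List (Int × Int))) :=
  let assigned := (waypoints.foldl
    (fun (st : PySem.Set (Int × Int) × List ((Int × Int) × Int)) p =>
      if PySem.Set.contains st.1 p then st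
      else
        (PySem.Set.add st.1 p,
         match pimsFind (PySem.List.enumerate squares 0) half_length p.1 p.2 with
         | some j => st.2 ++ [(p, j)]
         | none => st.2))
    (PySem.Set.empty, [])).2
  (PySem.List.enumerate squares 0).map
    (fun e => (pimsLabel e.1 e.2.1 e.2.2,
               ((assigned.filter (fun q => q.2 == e.1)).map (fun q => q.1))))

-- ===== PRECONDITION & SPEC =====
def Spec_points_in_multiple_squares (waypoints : List (Int × Int)) (squares : List (Int × Int)) (half_length : Int) (out : List (String × (List (Int × Int)))) : Prop := out = points_in_multiple_squares_alt waypoints squares half_length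
instance (waypoints : List (Int × Int)) (squares : List (Int × Int)) (half_length : Int) (out : List (String × (List (Int × Int)))) : Decidable (Spec_points_in_multiple_squares waypoints squares half_length out) := by unfold Spec_points_in_multiple_squares; infer_instance

-- ===== CLAIM (what is proved, stated in full; the proofs are below) =====
def Claim_equal_points_in_multiple_squares : Prop := ∀ (waypoints : List (Int × Int)) (squares : List (Int × Int)) (half_length : Int), Dom_points_in_multiple_squares waypoints squares half_length → Spec_points_in_multiple_squares waypoints squares half_length (points_in_multiple_squares waypoints squares half_length)


-- ===== LEMMAS AND PROOFS =====

-- the containment test of square c on point p, as one Bool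
def pimsInside (h : Int) (c p : Int × Int) : Bool :=
  decide (|p.1 - c.1| ≤ h) && decide (|p.2 - c.2| ≤ h)

theorem pims_inside_iff (h : Int) (c p : Int × Int) :
    pimsInside h c p = true ↔ (|p.1 - c.1| ≤ h ∧ |p.2 - c.2| ≤ h) := by
  simp [pimsInside]

-- A's inner loop over waypoints, in cons form: (points appended, used set after)
def pimsStep (h : Int) (c : Int × Int) : List (Int × Int) → List (Int × Int) → List (Int × Int) × List (Int × Int)
  | [], U => ([], U)
  | p :: ws, U =>
      if !(PySem.Set.contains U p) && decide (|p.1 - c.1| ≤ h) && decide (|p.2 - c.2| ≤ h) then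
        let r := pimsStep h c ws (PySem.Set.add U p)
        (p :: r.1, r.2)
      else pimsStep h c ws U

-- distinct elements of ws not in V, first-occurrence order ("seen"-set recursion)
def pimsSd : List (Int × Int) → List (Int × Int) → List (Int × Int)
  | [], _ => []
  | p :: ws, V => if PySem.Set.contains V p then pimsSd ws V else p :: pimsSd ws (PySem.Set.add V p)

-- B's first pass, in cons form
def pimsAsg (E : List (Int × (Int × Int))) (h : Int) : List (Int × Int) → List (Int × Int) → List ((Int × Int) × Int)
  | [], _ => []
  | p :: ws, V =>
      if PySem.Set.contains V p then pimsAsg E h ws V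
      else
        match pimsFind E h p.1 p.2 with
        | some j => (p, j) :: pimsAsg E h ws (PySem.Set.add V p)
        | none => pimsAsg E h ws (PySem.Set.add V p)

-- A's outer loop over the enumerated squares, in cons form
def pimsOuter (ws : List (Int × Int)) (h : Int) : List (Int × (Int × Int)) → List (Int × Int) → List (String × List (Int × Int))
  | [], _ => []
  | e :: es, U =>
      (pimsLabel e.1 e.2.1 e.2.2, (pimsStep h e.2 ws U).1) :: pimsOuter ws h es (pimsStep h e.2 ws U).2

theorem pims_guard (h : Int) (c p : Int × Int) (U : List (Int × Int)) :
    (!(PySem.Set.contains U p) && decide (|p.1 - c.1| ≤ h) && decide (|p.2 - c.2| ≤ h)) = true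
      ↔ (p ∉ U ∧ pimsInside h c p = true) := by
  simp [pimsInside, and_assoc]

theorem pims_stepFold (h : Int) (c : Int × Int) (ws : List (Int × Int)) (pts U : List (Int × Int)) :
    ws.foldl (fun (st2 : List (Int × Int) × PySem.Set (Int × Int)) p =>
        if !(PySem.Set.contains st2.2 p) && decide (|p.1 - c.1| ≤ h) && decide (|p.2 - c.2| ≤ h)
        then (st2.1 ++ [p], PySem.Set.add st2.2 p) else st2) (pts, U)
    = (pts ++ (pimsStep h c ws U).1, (pimsStep h c ws U).2) := by
  induction ws generalizing pts U with
  | nil => simp [pimsStep]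
  | cons p ws ih =>
    rw [List.foldl_cons]
    show ws.foldl _ (if (!(PySem.Set.contains U p) && decide (|p.1 - c.1| ≤ h) && decide (|p.2 - c.2| ≤ h)) = true then (pts ++ [p], PySem.Set.add U p) else (pts, U)) = _
    by_cases hg : (!(PySem.Set.contains U p) && decide (|p.1 - c.1| ≤ h) && decide (|p.2 - c.2| ≤ h)) = true
    · rw [if_pos hg, ih]
      show _ = (pts ++ (if (!(PySem.Set.contains U p) && decide (|p.1 - c.1| ≤ h) && decide (|p.2 - c.2| ≤ h)) = true then (p :: (pimsStep h c ws (PySem.Set.add U p)).1, (pimsStep h c ws (PySem.Set.add U p)).2) else pimsStep h c ws U).1,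
             (if (!(PySem.Set.contains U p) && decide (|p.1 - c.1| ≤ h) && decide (|p.2 - c.2| ≤ h)) = true then (p :: (pimsStep h c ws (PySem.Set.add U p)).1, (pimsStep h c ws (PySem.Set.add U p)).2) else pimsStep h c ws U).2)
      rw [if_pos hg]
      simp
    · rw [if_neg hg, ih]
      show _ = (pts ++ (if (!(PySem.Set.contains U p) && decide (|p.1 - c.1| ≤ h) && decide (|p.2 - c.2| ≤ h)) = true then (p :: (pimsStep h c ws (PySem.Set.add U p)).1, (pimsStep h c ws (PySem.Set.add U p)).2) else pimsStep h c ws U).1,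
             (if (!(PySem.Set.contains U p) && decide (|p.1 - c.1| ≤ h) && decide (|p.2 - c.2| ≤ h)) = true then (p :: (pimsStep h c ws (PySem.Set.add U p)).1, (pimsStep h c ws (PySem.Set.add U p)).2) else pimsStep h c ws U).2)
      rw [if_neg hg]

theorem pims_step_cons_pos (h : Int) (c : Int × Int) (p : Int × Int) (ws U : List (Int × Int))
    (h1 : p ∉ U) (h2 : pimsInside h c p = true) :
    pimsStep h c (p :: ws) U = (p :: (pimsStep h c ws (PySem.Set.add U p)).1, (pimsStep h c ws (PySem.Set.add U p)).2) := by
  have hg : (!(PySem.Set.contains U p) && decide (|p.1 - c.1| ≤ h) && decide (|p.2 - c.2| ≤ h)) = true :=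
    (pims_guard h c p U).mpr ⟨h1, h2⟩
  show (if (!(PySem.Set.contains U p) && decide (|p.1 - c.1| ≤ h) && decide (|p.2 - c.2| ≤ h)) = true then _ else _) = _
  rw [if_pos hg]

theorem pims_step_cons_neg (h : Int) (c : Int × Int) (p : Int × Int) (ws U : List (Int × Int))
    (hn : ¬ (p ∉ U ∧ pimsInside h c p = true)) :
    pimsStep h c (p :: ws) U = pimsStep h c ws U := by
  have hg : ¬ (!(PySem.Set.contains U p) && decide (|p.1 - c.1| ≤ h) && decide (|p.2 - c.2| ≤ h)) = true :=
    fun hh => hn ((pims_guard h c p U).mp hh)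
  show (if (!(PySem.Set.contains U p) && decide (|p.1 - c.1| ≤ h) && decide (|p.2 - c.2| ≤ h)) = true then _ else _) = _
  rw [if_neg hg]

theorem pims_sd_cons_pos (p : Int × Int) (ws V : List (Int × Int)) (hp : p ∈ V) :
    pimsSd (p :: ws) V = pimsSd ws V := by
  show (if PySem.Set.contains V p = true then _ else _) = _
  rw [if_pos ((PySem.Set.contains_iff V p).mpr hp)]

theorem pims_sd_cons_neg (p : Int × Int) (ws V : List (Int × Int)) (hp : p ∉ V) :
    pimsSd (p :: ws) V = p :: pimsSd ws (PySem.Set.add V p) := by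
  show (if PySem.Set.contains V p = true then _ else _) = _
  rw [if_neg (fun hh => hp ((PySem.Set.contains_iff V p).mp hh))]

theorem pims_asg_cons_pos (E : List (Int × (Int × Int))) (h : Int) (p : Int × Int) (ws V : List (Int × Int)) (hp : p ∈ V) :
    pimsAsg E h (p :: ws) V = pimsAsg E h ws V := by
  show (if PySem.Set.contains V p = true then _ else _) = _
  rw [if_pos ((PySem.Set.contains_iff V p).mpr hp)]

theorem pims_asg_cons_neg (E : List (Int × (Int × Int))) (h : Int) (p : Int × Int) (ws V : List (Int × Int)) (hp : p ∉ V) :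
    pimsAsg E h (p :: ws) V
      = match pimsFind E h p.1 p.2 with
        | some j => (p, j) :: pimsAsg E h ws (PySem.Set.add V p)
        | none => pimsAsg E h ws (PySem.Set.add V p) := by
  show (if PySem.Set.contains V p = true then _ else _) = _
  rw [if_neg (fun hh => hp ((PySem.Set.contains_iff V p).mp hh))]

theorem pims_contains_false (V : List (Int × Int)) (p : Int × Int) (hp : p ∉ V) :
    PySem.Set.contains V p = false :=
  Bool.eq_false_iff.mpr (fun hh => hp ((PySem.Set.contains_iff V p).mp hh))

theorem pims_step_snd (h : Int) (c : Int × Int) (ws : List (Int × Int)) : ∀ (U : List (Int × Int)),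
    (pimsStep h c ws U).2 = U ++ (pimsStep h c ws U).1 := by
  induction ws with
  | nil => intro U; simp [pimsStep]
  | cons p ws ih =>
    intro U
    by_cases hP : p ∉ U ∧ pimsInside h c p = true
    · rw [pims_step_cons_pos h c p ws U hP.1 hP.2]
      rw [ih (PySem.Set.add U p), PySem.Set.add_of_not_mem hP.1]
      simp
    · rw [pims_step_cons_neg h c p ws U hP]
      exact ih U

theorem pims_not_mem_sd (ws : List (Int × Int)) : ∀ (V : List (Int × Int)) (q : Int × Int), q ∈ V → q ∉ pimsSd ws V := by
  induction ws with
  | nil => intro V q _; simp [pimsSd]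
  | cons p ws ih =>
    intro V q hq
    by_cases hp : p ∈ V
    · rw [pims_sd_cons_pos p ws V hp]; exact ih V q hq
    · rw [pims_sd_cons_neg p ws V hp]
      have hqp : q ≠ p := fun h => hp (h ▸ hq)
      have hq' : q ∈ PySem.Set.add V p := (PySem.Set.mem_add V p q).mpr (Or.inl hq)
      simp only [List.mem_cons, not_or]
      exact ⟨hqp, ih _ q hq'⟩

theorem pims_mem_sd (ws : List (Int × Int)) : ∀ (V : List (Int × Int)) (q : Int × Int), q ∈ pimsSd ws V ↔ q ∈ ws ∧ q ∉ V := by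
  induction ws with
  | nil => intro V q; simp [pimsSd]
  | cons p ws ih =>
    intro V q
    by_cases hp : p ∈ V
    · rw [pims_sd_cons_pos p ws V hp, ih]
      simp only [List.mem_cons]
      constructor
      · rintro ⟨hw, hv⟩; exact ⟨Or.inr hw, hv⟩
      · rintro ⟨hw | hw, hv⟩
        · exact absurd (hw ▸ hp) hv
        · exact ⟨hw, hv⟩
    · rw [pims_sd_cons_neg p ws V hp]
      simp only [List.mem_cons, ih, PySem.Set.mem_add]
      constructor
      · rintro (rfl | ⟨hw, hv⟩)
        · exact ⟨Or.inl rfl, hp⟩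
        · exact ⟨Or.inr hw, fun hqv => hv (Or.inl hqv)⟩
      · rintro ⟨rfl | hw, hv⟩
        · exact Or.inl rfl
        · by_cases hqp : q = p
          · exact Or.inl hqp
          · exact Or.inr ⟨hw, fun hh => hh.elim hv hqp⟩

theorem pims_sd_filter (ws : List (Int × Int)) : ∀ (V W : List (Int × Int)), (∀ x, x ∈ W → x ∈ V) →
    pimsSd ws V = (pimsSd ws W).filter (fun x => !(PySem.Set.contains V x)) := by
  induction ws with
  | nil => intro V W _; simp [pimsSd]
  | cons p ws ih =>
    intro V W hWV
    by_cases hpW : p ∈ W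
    · rw [pims_sd_cons_pos p ws W hpW, pims_sd_cons_pos p ws V (hWV p hpW)]
      exact ih V W hWV
    · rw [pims_sd_cons_neg p ws W hpW, List.filter_cons]
      by_cases hpV : p ∈ V
      · rw [pims_sd_cons_pos p ws V hpV]
        rw [show (!(PySem.Set.contains V p)) = false by rw [(PySem.Set.contains_iff V p).mpr hpV]; rfl]
        simp only [Bool.false_eq_true, if_false]
        exact ih V (PySem.Set.add W p) (by
          intro x hx
          rcases (PySem.Set.mem_add W p x).mp hx with h1 | rfl
          · exact hWV x h1
          · exact hpV)
      · rw [pims_sd_cons_neg p ws V hpV]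
        rw [show (!(PySem.Set.contains V p)) = true by rw [pims_contains_false V p hpV]; rfl]
        simp only [if_true]
        congr 1
        rw [ih (PySem.Set.add V p) (PySem.Set.add W p) (by
          intro x hx
          rcases (PySem.Set.mem_add W p x).mp hx with h1 | heq
          · exact (PySem.Set.mem_add V p x).mpr (Or.inl (hWV x h1))
          · exact (PySem.Set.mem_add V p x).mpr (Or.inr heq))]
        apply List.filter_congr
        intro q hq
        have hpadd : p ∈ PySem.Set.add W p := (PySem.Set.mem_add W p p).mpr (Or.inr rfl)
        have hqp : q ≠ p := fun hh => (pims_not_mem_sd ws _ p hpadd) (hh ▸ hq)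
        have hcc : PySem.Set.contains (PySem.Set.add V p) q = PySem.Set.contains V q := by
          by_cases hqv : q ∈ V
          · rw [(PySem.Set.contains_iff _ q).mpr ((PySem.Set.mem_add V p q).mpr (Or.inl hqv)),
                (PySem.Set.contains_iff V q).mpr hqv]
          · rw [pims_contains_false V q hqv, pims_contains_false _ q (fun hh =>
              ((PySem.Set.mem_add V p q).mp hh).elim hqv hqp)]
        rw [hcc]

theorem pims_step_fst (h : Int) (c : Int × Int) (ws : List (Int × Int)) :
    ∀ (U V : List (Int × Int)),
    (∀ x, x ∈ V → x ∈ U ∨ pimsInside h c x = false) → (∀ x, x ∈ U → x ∈ V) →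
    (pimsStep h c ws U).1 = (pimsSd ws V).filter (fun x => pimsInside h c x) := by
  induction ws with
  | nil => intro U V _ _; simp [pimsStep, pimsSd]
  | cons p ws ih =>
    intro U V hVU hUV
    by_cases hpV : p ∈ V
    · rw [pims_sd_cons_pos p ws V hpV]
      have hn : ¬ (p ∉ U ∧ pimsInside h c p = true) := by
        rintro ⟨hpU, hin⟩
        rcases hVU p hpV with h1 | h1
        · exact hpU h1
        · rw [hin] at h1; simp at h1
      rw [pims_step_cons_neg h c p ws U hn]
      exact ih U V hVU hUV
    · have hpU : p ∉ U := fun hU => hpV (hUV p hU)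
      rw [pims_sd_cons_neg p ws V hpV, List.filter_cons]
      by_cases hIn : pimsInside h c p = true
      · rw [pims_step_cons_pos h c p ws U hpU hIn, hIn]
        simp only [if_true]
        congr 1
        exact ih (PySem.Set.add U p) (PySem.Set.add V p)
          (by intro x hx
              rcases (PySem.Set.mem_add V p x).mp hx with h1 | heq
              · rcases hVU x h1 with h2 | h2
                · exact Or.inl ((PySem.Set.mem_add U p x).mpr (Or.inl h2))
                · exact Or.inr h2
              · exact Or.inl ((PySem.Set.mem_add U p x).mpr (Or.inr heq)))
          (by intro x hx
              rcases (PySem.Set.mem_add U p x).mp hx with h1 | heq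
              · exact (PySem.Set.mem_add V p x).mpr (Or.inl (hUV x h1))
              · exact (PySem.Set.mem_add V p x).mpr (Or.inr heq))
      · have hIn' : pimsInside h c p = false := Bool.eq_false_iff.mpr hIn
        rw [pims_step_cons_neg h c p ws U (fun hh => hIn hh.2), hIn']
        simp only [Bool.false_eq_true, if_false]
        exact ih U (PySem.Set.add V p)
          (by intro x hx
              rcases (PySem.Set.mem_add V p x).mp hx with h1 | rfl
              · exact hVU x h1
              · exact Or.inr hIn')
          (by intro x hx
              exact (PySem.Set.mem_add V p x).mpr (Or.inl (hUV x hx)))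

theorem pims_find_append (h x y : Int) (l1 l2 : List (Int × (Int × Int))) :
    pimsFind (l1 ++ l2) h x y = (pimsFind l1 h x y).or (pimsFind l2 h x y) := by
  induction l1 with
  | nil => simp [pimsFind]
  | cons e l1 ih =>
    by_cases hc : (|x - e.2.1| ≤ h ∧ |y - e.2.2| ≤ h)
    · simp [pimsFind, hc]
    · simp [pimsFind, hc, ih]

theorem pims_find_mem (h x y : Int) : ∀ (l : List (Int × (Int × Int))) (j : Int), pimsFind l h x y = some j → ∃ c, (j, c) ∈ l := by
  intro l
  induction l with
  | nil => intro j hj; simp [pimsFind] at hj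
  | cons e l ih =>
    intro j hj
    by_cases hc : (|x - e.2.1| ≤ h ∧ |y - e.2.2| ≤ h)
    · simp only [pimsFind, if_pos hc, Option.some.injEq] at hj
      exact ⟨e.2, by simp [← hj]⟩
    · simp only [pimsFind, if_neg hc] at hj
      rcases ih j hj with ⟨c, hcm⟩
      exact ⟨c, by simp [hcm]⟩

theorem pims_find_char (h : Int) (ws : List (Int × Int)) (pre es' : List (Int × (Int × Int))) (e : Int × (Int × Int))
    (hpw : (pre ++ e :: es').Pairwise (fun a b => a.1 < b.1))
    (U : List (Int × Int))
    (hU : ∀ q : Int × Int, q ∈ U ↔ q ∈ ws ∧ ∃ j c', (j, c') ∈ pre ∧ pimsFind (pre ++ e :: es') h q.1 q.2 = some j)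
    (q : Int × Int) (hq : q ∈ ws) :
    ((q ∉ U ∧ pimsInside h e.2 q = true) ↔ pimsFind (pre ++ e :: es') h q.1 q.2 = some e.1) := by
  have hpre : ∀ j c', (j, c') ∈ pre → j < e.1 := by
    intro j c' hm
    exact (List.pairwise_append.mp hpw).2.2 (j, c') hm e (by simp)
  have hpost : ∀ j c', (j, c') ∈ es' → e.1 < j := by
    intro j c' hm
    exact (List.pairwise_cons.mp (List.pairwise_append.mp hpw).2.1).1 (j, c') hm
  have hsplit : pimsFind (pre ++ e :: es') h q.1 q.2
      = (pimsFind pre h q.1 q.2).or (pimsFind (e :: es') h q.1 q.2) := pims_find_append h q.1 q.2 pre (e :: es')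
  have hcons : pimsFind (e :: es') h q.1 q.2
      = if pimsInside h e.2 q = true then some e.1 else pimsFind es' h q.1 q.2 := by
    by_cases hc : (|q.1 - e.2.1| ≤ h ∧ |q.2 - e.2.2| ≤ h)
    · rw [if_pos ((pims_inside_iff h e.2 q).mpr hc)]
      show (if |q.1 - e.2.1| ≤ h ∧ |q.2 - e.2.2| ≤ h then some e.1 else _) = _
      rw [if_pos hc]
    · rw [if_neg (fun hh => hc ((pims_inside_iff h e.2 q).mp hh))]
      show (if |q.1 - e.2.1| ≤ h ∧ |q.2 - e.2.2| ≤ h then some e.1 else _) = _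
      rw [if_neg hc]
  constructor
  · rintro ⟨hqU, hin⟩
    have hnone : pimsFind pre h q.1 q.2 = none := by
      cases hf : pimsFind pre h q.1 q.2 with
      | none => rfl
      | some j =>
        rcases pims_find_mem h q.1 q.2 pre j hf with ⟨c', hc'⟩
        exact absurd ((hU q).mpr ⟨hq, j, c', hc', by rw [hsplit, hf]; rfl⟩) hqU
    rw [hsplit, hnone, hcons, if_pos hin]
    rfl
  · intro hf
    have hnone : pimsFind pre h q.1 q.2 = none := by
      cases hf0 : pimsFind pre h q.1 q.2 with
      | none => rfl
      | some j =>
        have hj : pimsFind (pre ++ e :: es') h q.1 q.2 = some j := by rw [hsplit, hf0]; rfl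
        have hji : j = e.1 := by rw [hj] at hf; exact Option.some.inj hf
        rcases pims_find_mem h q.1 q.2 pre j hf0 with ⟨c', hc'⟩
        exact absurd (hji ▸ hpre j c' hc') (lt_irrefl e.1)
    have hin : pimsInside h e.2 q = true := by
      by_contra hin
      rw [hsplit, hnone, Option.none_or, hcons, if_neg hin] at hf
      rcases pims_find_mem h q.1 q.2 es' e.1 hf with ⟨c', hc'⟩
      exact absurd (hpost e.1 c' hc') (lt_irrefl e.1)
    refine ⟨?_, hin⟩
    intro hqU
    rcases ((hU q).mp hqU).2 with ⟨j, c', hc', hfj⟩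
    have hji : j = e.1 := by rw [hfj] at hf; exact Option.some.inj hf
    exact absurd (hji ▸ hpre j c' hc') (lt_irrefl e.1)

theorem pims_outerFold (ws : List (Int × Int)) (h : Int) (es : List (Int × (Int × Int))) :
    ∀ (acc : List (String × List (Int × Int))) (U : List (Int × Int)),
    (es.foldl (fun (st : List (String × List (Int × Int)) × PySem.Set (Int × Int)) e =>
      let inner := ws.foldl
        (fun (st2 : List (Int × Int) × PySem.Set (Int × Int)) p =>
          if !(PySem.Set.contains st2.2 p) && decide (|p.1 - e.2.1| ≤ h) && decide (|p.2 - e.2.2| ≤ h)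
          then (st2.1 ++ [p], PySem.Set.add st2.2 p)
          else st2)
        ([], st.2)
      (st.1 ++ [(pimsLabel e.1 e.2.1 e.2.2, inner.1)], inner.2)) (acc, U)).1
    = acc ++ pimsOuter ws h es U := by
  induction es with
  | nil => intro acc U; simp [pimsOuter]
  | cons e es ih =>
    intro acc U
    rw [List.foldl_cons]
    show (es.foldl _ (acc ++ [(pimsLabel e.1 e.2.1 e.2.2, (ws.foldl (fun (st2 : List (Int × Int) × PySem.Set (Int × Int)) p =>
          if !(PySem.Set.contains st2.2 p) && decide (|p.1 - e.2.1| ≤ h) && decide (|p.2 - e.2.2| ≤ h)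
          then (st2.1 ++ [p], PySem.Set.add st2.2 p)
          else st2) ([], U)).1)], (ws.foldl (fun (st2 : List (Int × Int) × PySem.Set (Int × Int)) p =>
          if !(PySem.Set.contains st2.2 p) && decide (|p.1 - e.2.1| ≤ h) && decide (|p.2 - e.2.2| ≤ h)
          then (st2.1 ++ [p], PySem.Set.add st2.2 p)
          else st2) ([], U)).2)).1 = _
    rw [pims_stepFold h e.2 ws [] U]
    rw [ih]
    simp [pimsOuter]

theorem pims_asgFold (E : List (Int × (Int × Int))) (h : Int) (ws : List (Int × Int)) :
    ∀ (V : List (Int × Int)) (acc : List ((Int × Int) × Int)),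
    (ws.foldl (fun (st : PySem.Set (Int × Int) × List ((Int × Int) × Int)) p =>
        if PySem.Set.contains st.1 p then st
        else
          (PySem.Set.add st.1 p,
           match pimsFind E h p.1 p.2 with
           | some j => st.2 ++ [(p, j)]
           | none => st.2)) (V, acc)).2
    = acc ++ pimsAsg E h ws V := by
  induction ws with
  | nil => intro V acc; simp [pimsAsg]
  | cons p ws ih =>
    intro V acc
    rw [List.foldl_cons]
    by_cases hp : p ∈ V
    · show (ws.foldl _ (if PySem.Set.contains V p = true then (V, acc) else _)).2 = _
      rw [if_pos ((PySem.Set.contains_iff V p).mpr hp), pims_asg_cons_pos E h p ws V hp]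
      exact ih V acc
    · show (ws.foldl _ (if PySem.Set.contains V p = true then (V, acc) else (PySem.Set.add V p,
           match pimsFind E h p.1 p.2 with
           | some j => acc ++ [(p, j)]
           | none => acc))).2 = _
      rw [if_neg (fun hh => hp ((PySem.Set.contains_iff V p).mp hh)), pims_asg_cons_neg E h p ws V hp]
      cases hf : pimsFind E h p.1 p.2 with
      | some j =>
        rw [ih]
        simp
      | none =>
        exact ih _ acc

theorem pims_asg_eq (E : List (Int × (Int × Int))) (h : Int) (ws : List (Int × Int)) :
    ∀ (V : List (Int × Int)),
    pimsAsg E h ws V = (pimsSd ws V).filterMap (fun x => (pimsFind E h x.1 x.2).map (fun j => (x, j))) := by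
  induction ws with
  | nil => intro V; simp [pimsAsg, pimsSd]
  | cons p ws ih =>
    intro V
    by_cases hp : p ∈ V
    · rw [pims_asg_cons_pos E h p ws V hp, pims_sd_cons_pos p ws V hp, ih]
    · rw [pims_asg_cons_neg E h p ws V hp, pims_sd_cons_neg p ws V hp]
      cases hf : pimsFind E h p.1 p.2 with
      | some j => simp [hf, ih]
      | none => simp [hf, ih]

theorem pims_bucket (E : List (Int × (Int × Int))) (h i : Int) (l : List (Int × Int)) :
    ((l.filterMap (fun x => (pimsFind E h x.1 x.2).map (fun j => (x, j)))).filter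
        (fun q => q.2 == i)).map (fun q => q.1)
    = l.filter (fun x => pimsFind E h x.1 x.2 == some i) := by
  induction l with
  | nil => simp
  | cons p l ih =>
    cases hf : pimsFind E h p.1 p.2 with
    | none => simp [hf, ih]
    | some j =>
      by_cases hj : j = i
      · simp [hf, hj, ih]
      · simp [hf, hj, ih]

theorem pims_outer_eq (ws : List (Int × Int)) (h : Int) (E : List (Int × (Int × Int))) (es : List (Int × (Int × Int))) :
    ∀ (pre : List (Int × (Int × Int))) (U : List (Int × Int)),
    pre ++ es = E →
    E.Pairwise (fun a b => a.1 < b.1) →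
    (∀ q : Int × Int, q ∈ U ↔ q ∈ ws ∧ ∃ j c', (j, c') ∈ pre ∧ pimsFind E h q.1 q.2 = some j) →
    pimsOuter ws h es U
      = es.map (fun e => (pimsLabel e.1 e.2.1 e.2.2,
          (pimsSd ws []).filter (fun x => pimsFind E h x.1 x.2 == some e.1))) := by
  induction es with
  | nil => intro pre U _ _ _; simp [pimsOuter]
  | cons e es ih =>
    intro pre U hE hpw hU
    subst hE
    have hchar := pims_find_char h ws pre es e hpw U hU
    have hbucket : (pimsStep h e.2 ws U).1
        = (pimsSd ws []).filter (fun x => pimsFind (pre ++ e :: es) h x.1 x.2 == some e.1) := by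
      rw [pims_step_fst h e.2 ws U U (fun x hx => Or.inl hx) (fun x hx => hx)]
      rw [pims_sd_filter ws U [] (by intro x hx; simp at hx)]
      rw [List.filter_filter]
      apply List.filter_congr
      intro q hq
      have hqws : q ∈ ws := ((pims_mem_sd ws [] q).mp hq).1
      have hiff := hchar q hqws
      rw [Bool.eq_iff_iff, Bool.and_eq_true, beq_iff_eq, ← hiff]
      constructor
      · rintro ⟨hin, hnc⟩
        refine ⟨fun hm => ?_, hin⟩
        rw [(PySem.Set.contains_iff U q).mpr hm] at hnc
        simp at hnc
      · rintro ⟨hnm, hin⟩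
        exact ⟨hin, by rw [pims_contains_false U q hnm]; rfl⟩
    show (pimsLabel e.1 e.2.1 e.2.2, (pimsStep h e.2 ws U).1) :: pimsOuter ws h es (pimsStep h e.2 ws U).2 = _
    rw [List.map_cons, hbucket]
    congr 1
    rw [pims_step_snd]
    apply ih (pre ++ [e]) (U ++ (pimsStep h e.2 ws U).1) (by simp) hpw
    intro q
    rw [List.mem_append, hU q, hbucket, List.mem_filter, pims_mem_sd]
    constructor
    · rintro (⟨hw, j, c', hm, hf⟩ | ⟨⟨hw, _⟩, hf⟩)
      · exact ⟨hw, j, c', by simp [hm], hf⟩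
      · refine ⟨hw, e.1, e.2, by simp, ?_⟩
        simpa using hf
    · rintro ⟨hw, j, c', hm, hf⟩
      rcases (by simpa using hm : (j, c') ∈ pre ∨ (j, c') = e) with hm' | hm'
      · exact Or.inl ⟨hw, j, c', hm', hf⟩
      · refine Or.inr ⟨⟨hw, by simp⟩, ?_⟩
        have hj : j = e.1 := congrArg Prod.fst hm'
        subst hj
        simp [hf]

-- ===== VERDICT (by name: the statement is the Claim_ definition above) =====
theorem points_in_multiple_squares_spec : Claim_equal_points_in_multiple_squares := by
  intro ws sqs h _dom
  unfold Spec_points_in_multiple_squares points_in_multiple_squares points_in_multiple_squares_alt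
  rw [pims_outerFold ws h (PySem.List.enumerate sqs 0) [] PySem.Set.empty]
  rw [pims_asgFold (PySem.List.enumerate sqs 0) h ws PySem.Set.empty []]
  show [] ++ pimsOuter ws h (PySem.List.enumerate sqs 0) []
      = List.map (fun e => (pimsLabel e.1 e.2.1 e.2.2,
          (([] ++ pimsAsg (PySem.List.enumerate sqs 0) h ws []).filter (fun q : ((Int × Int) × Int) => q.2 == e.1)).map (fun q : ((Int × Int) × Int) => q.1)))
        (PySem.List.enumerate sqs 0)
  rw [List.nil_append, List.nil_append]
  rw [pims_outer_eq ws h (PySem.List.enumerate sqs 0) (PySem.List.enumerate sqs 0) [] [] rfl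
    (PySem.List.pairwise_lt_enumerate sqs 0) (by intro q; simp)]
  simp only [pims_asg_eq, pims_bucket]
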